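-- pv_equiv track=rewrite | github.com/giacomoarienti/SAE-based-representation-engineering | spare/datasets/graph_utils.py | lookup_table_graph
-- ===== SOURCE A (Python) =====
-- def lookup_table_graph(graph):
--     def index_to_alpha(n):
--         import string
--         n += 26  # Start from 'aa' instead of 'a'
--         result = ''
--         while n >= 0:
--             result = chr(ord('a') + (n % 26)) + result
--             n = n // 26 - 1
--             if n < 0:
--                 break
--         return result
--
--     entity_map = {}
--     rel_map = {}
--     entity_ids = {}
--     rel_ids = {}
--     entity_counter = 0
--     rel_counter = 0
--     triples = []
--
--     for t in graph:
--         if len(t) != 3: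
--             continue
--         head, rel, tail = t
--         for e in [head, tail]:
--             if e not in entity_ids:
--                 key = chr(ord('A') + entity_counter)
--                 entity_ids[e] = key
--                 entity_map[key] = e
--                 entity_counter += 1
--         if rel not in rel_ids:
--             key = index_to_alpha(rel_counter)
--             rel_ids[rel] = key
--             rel_map[key] = rel
--             rel_counter += 1
--         triples.append(f"{entity_ids[head]}, {rel_ids[rel]}, {entity_ids[tail]}")
--
--     lines = []
--     lines.append("The entities are assigned symbolic keys as follows:")
--     for k, v in entity_map.items():
--         lines.append(f"{k}: {v}")
--     lines.append("\nThe relations are assigned symbolic keys as follows:")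
--     for k, v in rel_map.items():
--         lines.append(f"{k}: {v}")
--     lines.append("\nThe graph is defined with the symbolic references:")
--     lines.extend(triples)
--     return "" + "\n".join(lines)
-- ===== SOURCE B (Python) =====
-- def lookup_table_graph(graph):
--     def index_to_alpha(n):
--         n += 26  # Start from 'aa' instead of 'a'
--         result = ''
--         while n >= 0:
--             result = chr(ord('a') + (n % 26)) + result
--             n = n // 26 - 1
--             if n < 0:
--                 break
--         return result
--
--     valid = [t for t in graph if len(t) == 3]
--
--     # Occurrence streams: entities in head-then-tail order, relations in triple order.
--     flat_e = [e for h, _, tl in valid for e in (h, tl)]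
--     flat_r = [r for _, r, _ in valid]
--
--     # Earliest-occurrence index of every distinct item: walk the enumerated stream
--     # backwards and let later (= smaller-index) writes overwrite.
--     def first_index(stream):
--         first = {}
--         for i, x in reversed(list(enumerate(stream))):
--             first[x] = i
--         return first
--
--     first_e = first_index(flat_e)
--     first_r = first_index(flat_r)
--
--     # First-appearance order = the distinct items sorted by earliest index.
--     ents = sorted(first_e, key=first_e.get)
--     rels = sorted(first_r, key=first_r.get)
--
--     ekey = {e: chr(ord('A') + i) for i, e in enumerate(ents)}
--     rkey = {r: index_to_alpha(i) for i, r in enumerate(rels)}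
--
--     lines = ["The entities are assigned symbolic keys as follows:"]
--     lines += [f"{ekey[e]}: {e}" for e in ents]
--     lines.append("\nThe relations are assigned symbolic keys as follows:")
--     lines += [f"{rkey[r]}: {r}" for r in rels]
--     lines.append("\nThe graph is defined with the symbolic references:")
--     lines += [f"{ekey[h]}, {rkey[r]}, {ekey[tl]}" for h, r, tl in valid]
--     return "\n".join(lines)
-- ===== Notes on version B (the rewrite author's own statement) =====
-- stated objective: alternative
-- what changed: Replaces A's single interleaved pass (four dicts and two counters assigning keys while rendering triples) by an index-and-sort algorithm: flatten the entity/relation occurrence streams, compute each distinct item's earliest index with a reversed overwrite loop, sort the distinct items by that index to recover first-appearance order, then render all three sections from the finished position tables.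
import Mathlib
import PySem

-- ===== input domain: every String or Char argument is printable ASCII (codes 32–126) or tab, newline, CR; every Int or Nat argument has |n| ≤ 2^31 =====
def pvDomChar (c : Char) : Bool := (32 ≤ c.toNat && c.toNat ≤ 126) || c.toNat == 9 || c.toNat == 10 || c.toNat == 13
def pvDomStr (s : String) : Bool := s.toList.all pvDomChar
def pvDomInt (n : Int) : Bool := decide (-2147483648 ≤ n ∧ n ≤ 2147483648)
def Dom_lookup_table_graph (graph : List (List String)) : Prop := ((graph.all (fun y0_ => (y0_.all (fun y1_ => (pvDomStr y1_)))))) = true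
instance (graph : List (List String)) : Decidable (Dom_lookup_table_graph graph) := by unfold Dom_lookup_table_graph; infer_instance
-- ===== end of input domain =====

-- B replaces A's single interleaved pass (four dicts, two counters, triples built on the fly) by an
-- index-and-sort algorithm: flatten the occurrence streams, compute each distinct item's earliest
-- index by a reversed overwrite loop, sort the distinct items by that index, and render all three
-- sections from the finished position tables; alternative decomposition (no speed claim).

-- ===== PORT A =====

-- chr(n): exact for n < 0xD800 (far beyond any realistic table; a Lean `Char` cannot hold
-- surrogate code points); past that an injective placeholder, so distinct counters keep
-- distinct keys exactly as Python's chr does.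
def pyChr (n : Nat) : String :=
  if n < 55296 then String.ofList [Char.ofNat n] else String.ofList (List.replicate (n + 2) '?')

-- the `while n >= 0: result = chr(...) + result; n = n // 26 - 1; if n < 0: break` loop,
-- accumulating the (always 'a'..'z') characters of `result` as a List Char
def idaLoop (n : Int) (result : List Char) : List Char :=
  if 0 ≤ n then
    if PySem.Int.floordiv n 26 - 1 < 0 then
      Char.ofNat (97 + (PySem.Int.mod n 26).toNat) :: result
    else
      idaLoop (PySem.Int.floordiv n 26 - 1) (Char.ofNat (97 + (PySem.Int.mod n 26).toNat) :: result)
  else result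
termination_by n.toNat
decreasing_by
  have h2 : PySem.Int.floordiv n 26 = n / 26 := PySem.Int.floordiv_eq_ediv_of_pos (by norm_num)
  have h3 : n / 26 ≤ n := Int.ediv_le_self 26 (by omega)
  simp only [h2] at *
  omega

-- index_to_alpha, shared verbatim by Source A and Source B, ported once
def index_to_alpha (n : Int) : String := String.ofList (idaLoop (n + 26) [])

structure AState where
  entity_map : PySem.Dict String String
  rel_map : PySem.Dict String String
  entity_ids : PySem.Dict String String
  rel_ids : PySem.Dict String String
  entity_counter : Nat      -- only ever 0,1,2,…, so kept as Nat
  rel_counter : Nat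
  triples : List String
deriving Repr

-- body of `for e in [head, tail]: if e not in entity_ids: …`
def stepAEnt (s : AState) (e : String) : AState :=
  if s.entity_ids.contains e then s
  else
    { s with entity_ids := s.entity_ids.insert e (pyChr (65 + s.entity_counter)),
             entity_map := s.entity_map.insert (pyChr (65 + s.entity_counter)) e,
             entity_counter := s.entity_counter + 1 }

-- body of `for t in graph: …`; the get?/getD "" lookups cannot miss (the keys were just ensured)
def stepA (s : AState) (t : List String) : AState :=
  if PySem.List.len t ≠ 3 then s
  else match t with
  | [head, rel, tail] =>
    let s1 := [head, tail].foldl stepAEnt s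
    let s2 :=
      if s1.rel_ids.contains rel then s1
      else { s1 with rel_ids := s1.rel_ids.insert rel (index_to_alpha (s1.rel_counter : Int)),
                     rel_map := s1.rel_map.insert (index_to_alpha (s1.rel_counter : Int)) rel,
                     rel_counter := s1.rel_counter + 1 }
    { s2 with triples := s2.triples ++
        [((s2.entity_ids.get? head).getD "" ++ ", " ++ (s2.rel_ids.get? rel).getD ""
            ++ ", " ++ (s2.entity_ids.get? tail).getD "")] }
  | _ => s

def lookup_table_graph (graph : List (List String)) : String :=
  let s := graph.foldl stepA ⟨.empty, .empty, .empty, .empty, 0, 0, []⟩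
  let lines : List String :=
    ["The entities are assigned symbolic keys as follows:"]
    ++ s.entity_map.items.map (fun kv => kv.1 ++ ": " ++ kv.2)
    ++ ["\nThe relations are assigned symbolic keys as follows:"]
    ++ s.rel_map.items.map (fun kv => kv.1 ++ ": " ++ kv.2)
    ++ ["\nThe graph is defined with the symbolic references:"]
    ++ s.triples
  PySem.Str.join "\n" lines

-- ===== PORT B =====

-- `[e for h, _, tl in valid for e in (h, tl)]`; the `_ => []` arm is unreachable
-- (every member of valid has length 3, where Python's unpacking succeeds)
def flatEnts (valid : List (List String)) : List String :=
  valid.flatMap (fun t => match t with | [h, _, tl] => [h, tl] | _ => [])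

-- `[r for _, r, _ in valid]`; the `_ => ""` arm is likewise unreachable
def flatRels (valid : List (List String)) : List String :=
  valid.map (fun t => match t with | [_, r, _] => r | _ => "")

-- `first = {}; for i, x in reversed(list(enumerate(stream))): first[x] = i`
def firstIndex (stream : List String) : PySem.Dict String Int :=
  (PySem.List.enumerate stream).reverse.foldl (fun d p => d.insert p.2 p.1) .empty

-- `{x: F(i) for i, x in enumerate(xs)}`
def mkKeyDict (xs : List String) (F : Int → String) : PySem.Dict String String :=
  (PySem.List.enumerate xs).foldl (fun d p => d.insert p.2 (F p.1)) .empty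

def lookup_table_graph_alt (graph : List (List String)) : String :=
  let valid := graph.filter (fun t => PySem.List.len t == 3)
  let firstE := firstIndex (flatEnts valid)
  let firstR := firstIndex (flatRels valid)
  -- `sorted(first_e, key=first_e.get)`: iterating a dict yields its keys; the key
  -- function always hits (every key is in the dict), so `.getD 0` only totalizes
  let ents := PySem.List.sorted firstE.keys (fun e => (firstE.get? e).getD 0) false
  let rels := PySem.List.sorted firstR.keys (fun r => (firstR.get? r).getD 0) false
  -- chr(ord('A') + i) with i from enumerate, hence i ≥ 0 and `.toNat` is exact
  let ekey := mkKeyDict ents (fun i => pyChr (65 + i.toNat))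
  let rkey := mkKeyDict rels (fun i => index_to_alpha i)
  -- the ekey[...]/rkey[...] lookups cannot miss, so `.getD ""` only totalizes
  let lines : List String :=
    ["The entities are assigned symbolic keys as follows:"]
    ++ ents.map (fun e => (ekey.get? e).getD "" ++ ": " ++ e)
    ++ ["\nThe relations are assigned symbolic keys as follows:"]
    ++ rels.map (fun r => (rkey.get? r).getD "" ++ ": " ++ r)
    ++ ["\nThe graph is defined with the symbolic references:"]
    ++ valid.map (fun t => match t with
        | [h, r, tl] => (ekey.get? h).getD "" ++ ", " ++ (rkey.get? r).getD ""
            ++ ", " ++ (ekey.get? tl).getD ""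
        | _ => "")
  PySem.Str.join "\n" lines

-- ===== PRECONDITION & SPEC =====
def Spec_lookup_table_graph (graph : List (List String)) (out : String) : Prop := out = lookup_table_graph_alt graph
instance (graph : List (List String)) (out : String) : Decidable (Spec_lookup_table_graph graph out) := by unfold Spec_lookup_table_graph; infer_instance

-- ===== CLAIM (what is proved, stated in full; the proofs are below) =====
def Claim_equal_lookup_table_graph : Prop := ∀ (graph : List (List String)), Dom_lookup_table_graph graph → Spec_lookup_table_graph graph (lookup_table_graph graph)

-- ===== LEMMAS AND PROOFS =====

-- the valid-triple list
def pvValid (g : List (List String)) : List (List String) := g.filter (fun t => PySem.List.len t == 3)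

-- append x when unseen: the shape of every table update in A, and the
-- first-appearance dedup both sides must agree on
def snocIf (l : List String) (x : String) : List String := if x ∈ l then l else l ++ [x]

-- A's per-triple effect on the two tables, abstracted from its dicts
def collectStep (p : List String × List String) (t : List String) : List String × List String :=
  match t with
  | [h, r, tl] =>
    let ents := if h ∈ p.1 then p.1 else p.1 ++ [h]
    let ents2 := if tl ∈ ents then ents else ents ++ [tl]
    let rels := if r ∈ p.2 then p.2 else p.2 ++ [r]
    (ents2, rels)
  | _ => p

def pvER (g : List (List String)) : List String × List String := (pvValid g).foldl collectStep ([], [])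

-- first-appearance dedup of a stream
def dedupF (s : List String) : List String := s.foldl snocIf []

-- the canonical A-state determined by the tables
def eidsC (ents : List String) : PySem.Dict String String :=
  PySem.Dict.mk (ents.zipIdx.map (fun p => (p.1, pyChr (65 + p.2))))
def emapC (ents : List String) : PySem.Dict String String :=
  PySem.Dict.mk (ents.zipIdx.map (fun p => (pyChr (65 + p.2), p.1)))
def ridsC (rels : List String) : PySem.Dict String String :=
  PySem.Dict.mk (rels.zipIdx.map (fun p => (p.1, index_to_alpha (p.2 : Int))))
def rmapC (rels : List String) : PySem.Dict String String :=
  PySem.Dict.mk (rels.zipIdx.map (fun p => (index_to_alpha (p.2 : Int), p.1)))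

def canonS (ents rels trs : List String) : AState :=
  ⟨emapC ents, rmapC rels, eidsC ents, ridsC rels, ents.length, rels.length, trs⟩

-- the key of an item = its table position
def ekeyB (ents : List String) (e : String) : String :=
  pyChr (65 + ((PySem.List.index? ents e).getD 0))
def rkeyB (rels : List String) (r : String) : String :=
  index_to_alpha (((PySem.List.index? rels r).getD 0 : Nat) : Int)

def renderTriple (ents rels : List String) (t : List String) : String :=
  match t with
  | [h, r, tl] => ekeyB ents h ++ ", " ++ rkeyB rels r ++ ", " ++ ekeyB ents tl
  | _ => ""

def canon (g : List (List String)) : AState :=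
  canonS (pvER g).1 (pvER g).2 ((pvValid g).map (renderTriple (pvER g).1 (pvER g).2))

-- the common normal form both programs are reduced to
def canonLines (g : List (List String)) : List String :=
  ["The entities are assigned symbolic keys as follows:"]
  ++ (pvER g).1.map (fun e => ekeyB (pvER g).1 e ++ ": " ++ e)
  ++ ["\nThe relations are assigned symbolic keys as follows:"]
  ++ (pvER g).2.map (fun r => rkeyB (pvER g).2 r ++ ": " ++ r)
  ++ ["\nThe graph is defined with the symbolic references:"]
  ++ (pvValid g).map (renderTriple (pvER g).1 (pvER g).2)

@[simp] theorem canonS_entity_map (a b c : List String) : (canonS a b c).entity_map = emapC a := rfl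
@[simp] theorem canonS_rel_map (a b c : List String) : (canonS a b c).rel_map = rmapC b := rfl
@[simp] theorem canonS_entity_ids (a b c : List String) : (canonS a b c).entity_ids = eidsC a := rfl
@[simp] theorem canonS_rel_ids (a b c : List String) : (canonS a b c).rel_ids = ridsC b := rfl
@[simp] theorem canonS_entity_counter (a b c : List String) : (canonS a b c).entity_counter = a.length := rfl
@[simp] theorem canonS_rel_counter (a b c : List String) : (canonS a b c).rel_counter = b.length := rfl
@[simp] theorem canonS_triples (a b c : List String) : (canonS a b c).triples = c := rfl

-- snocIf facts
theorem mem_snocIf_self (l : List String) (x : String) : x ∈ snocIf l x := by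
  unfold snocIf; split_ifs with h
  · exact h
  · simp
theorem mem_snocIf_of_mem (l : List String) (x y : String) (h : y ∈ l) : y ∈ snocIf l x := by
  unfold snocIf; split_ifs with hx
  · exact h
  · simp [h]
theorem nodup_snocIf (l : List String) (x : String) (h : l.Nodup) : (snocIf l x).Nodup := by
  unfold snocIf; split_ifs with hx
  · exact h
  · rw [List.nodup_append]
    refine ⟨h, List.nodup_singleton x, ?_⟩
    intro a ha b hb
    rw [List.mem_singleton] at hb
    subst hb
    exact fun hax => hx (hax ▸ ha)
theorem snocIf_eq_append (l : List String) (x : String) : ∃ ext, snocIf l x = l ++ ext := by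
  unfold snocIf; split_ifs with hx
  · exact ⟨[], by simp⟩
  · exact ⟨[x], rfl⟩

theorem collectStep_triple (p : List String × List String) (h r tl : String) :
    collectStep p [h, r, tl] = (snocIf (snocIf p.1 h) tl, snocIf p.2 r) := by
  simp [collectStep, snocIf]

-- injectivity of chr
theorem charOfNat_toNat (n : Nat) (h : n < 55296) : (Char.ofNat n).toNat = n := by
  unfold Char.ofNat
  rw [dif_pos (by left; omega)]
  simp [Char.ofNatAux, Char.toNat]

theorem pyChr_inj : Function.Injective pyChr := by
  intro m n h
  unfold pyChr at h
  have h' := congrArg String.toList h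
  clear h
  split_ifs at h' with h1 h2 h2
  · have hc : Char.ofNat m = Char.ofNat n := by simpa using h'
    have hm := charOfNat_toNat m h1
    have hn := charOfNat_toNat n h2
    rw [← hm, ← hn, hc]
  · exfalso
    have := congrArg List.length h'
    simp at this
  · exfalso
    have := congrArg List.length h'
    simp at this
  · have := congrArg List.length h'
    simp at this
    omega

-- decoding index_to_alpha: fold the digits back into the number
def itaDecode (cs : List Char) : Int :=
  cs.foldl (fun a c => (a + 1) * 26 + ((c.toNat : Int) - 97)) (-1)

theorem itaDigit_toNat (n : Int) :
    ((Char.ofNat (97 + (PySem.Int.mod n 26).toNat)).toNat : Int) - 97 = PySem.Int.mod n 26 := by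
  have h1 : 0 ≤ PySem.Int.mod n 26 := PySem.Int.mod_nonneg n (by norm_num)
  have h2 : PySem.Int.mod n 26 < 26 := PySem.Int.mod_lt n (by norm_num)
  have h3 := charOfNat_toNat (97 + (PySem.Int.mod n 26).toNat) (by omega)
  rw [h3]
  omega

theorem itaDecode_digit (n : Int) :
    itaDecode [Char.ofNat (97 + (PySem.Int.mod n 26).toNat)] = PySem.Int.mod n 26 := by
  have hd := itaDigit_toNat n
  simp only [itaDecode, List.foldl_cons, List.foldl_nil]
  omega

theorem floordiv26_le (n : Int) (h0 : 0 ≤ n) :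
    PySem.Int.floordiv n 26 - 1 < n ∧ 0 ≤ PySem.Int.floordiv n 26 := by
  have h2 : PySem.Int.floordiv n 26 = n / 26 := PySem.Int.floordiv_eq_ediv_of_pos (by norm_num)
  have h3 : n / 26 ≤ n := Int.ediv_le_self 26 h0
  have h4 : 0 ≤ n / 26 := Int.ediv_nonneg h0 (by norm_num)
  omega

theorem idaLoop_append (k : Nat) (n : Int) (hk : n.toNat ≤ k) (res : List Char) :
    idaLoop n res = idaLoop n [] ++ res := by
  induction k generalizing n res with
  | zero =>
    conv_lhs => rw [idaLoop]
    conv_rhs => rw [idaLoop]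
    by_cases h0 : 0 ≤ n
    · have hn : n = 0 := by omega
      subst hn
      have hlt : PySem.Int.floordiv (0 : Int) 26 - 1 < 0 := by
        rw [PySem.Int.floordiv_eq_ediv_of_pos (by norm_num)]; norm_num
      rw [if_pos h0, if_pos h0, if_pos hlt, if_pos hlt]
      rfl
    · rw [if_neg h0, if_neg h0]
      rfl
  | succ k ih =>
    conv_lhs => rw [idaLoop]
    conv_rhs => rw [idaLoop]
    by_cases h0 : 0 ≤ n
    · rw [if_pos h0, if_pos h0]
      by_cases h1 : PySem.Int.floordiv n 26 - 1 < 0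
      · rw [if_pos h1, if_pos h1]
        rfl
      · rw [if_neg h1, if_neg h1]
        have hle : (PySem.Int.floordiv n 26 - 1).toNat ≤ k := by
          have := floordiv26_le n h0
          omega
        rw [ih _ hle, ih _ hle [Char.ofNat (97 + (PySem.Int.mod n 26).toNat)]]
        simp
    · rw [if_neg h0, if_neg h0]
      rfl

theorem itaDecode_append (l : List Char) (c : Char) :
    itaDecode (l ++ [c]) = (itaDecode l + 1) * 26 + ((c.toNat : Int) - 97) := by
  simp [itaDecode, List.foldl_append]

theorem itaDecode_idaLoop (k : Nat) (n : Int) (h0 : 0 ≤ n) (hk : n.toNat ≤ k) :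
    itaDecode (idaLoop n []) = n := by
  induction k generalizing n with
  | zero =>
    have hn : n = 0 := by omega
    subst hn
    conv_lhs => rw [idaLoop]
    have hfl := floordiv26_le 0 h0
    have hsum := PySem.Int.floordiv_mul_add_mod (0 : Int) 26
    have h1 : PySem.Int.floordiv (0 : Int) 26 - 1 < 0 := by omega
    rw [if_pos h0, if_pos h1, itaDecode_digit]
    omega
  | succ k ih =>
    conv_lhs => rw [idaLoop]
    rw [if_pos h0]
    have hfl := floordiv26_le n h0
    have hsum := PySem.Int.floordiv_mul_add_mod n 26
    by_cases h1 : PySem.Int.floordiv n 26 - 1 < 0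
    · rw [if_pos h1, itaDecode_digit]
      omega
    · rw [if_neg h1]
      have hle : (PySem.Int.floordiv n 26 - 1).toNat ≤ k := by omega
      rw [idaLoop_append k _ hle, itaDecode_append, ih _ (by omega) hle]
      have hd := itaDigit_toNat n
      omega

theorem ita_inj (m n : Nat) (h : index_to_alpha (m : Int) = index_to_alpha (n : Int)) : m = n := by
  unfold index_to_alpha at h
  have h' := congrArg String.toList h
  simp only [String.toList_ofList] at h'
  have hm := itaDecode_idaLoop ((m : Int) + 26).toNat _ (by positivity) le_rfl
  have hn := itaDecode_idaLoop ((n : Int) + 26).toNat _ (by positivity) le_rfl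
  rw [h'] at hm
  rw [hm] at hn
  omega

-- index? agrees with idxOf on members
theorem index?_eq_idxOf (l : List String) (e : String) (he : e ∈ l) :
    PySem.List.index? l e = some (l.idxOf e) := by
  induction l with
  | nil => cases he
  | cons x xs ih =>
    by_cases hx : x = e
    · subst hx
      rw [PySem.List.index?_cons_self, List.idxOf_cons_self]
    · have he' : e ∈ xs := by
        rcases List.mem_cons.mp he with h | h
        · exact absurd h.symm hx
        · exact h
      rw [PySem.List.index?_cons_of_ne xs hx, ih he', List.idxOf_cons_ne xs hx]
      rfl

-- collectStep facts
theorem collect_mono1 (p : List String × List String) (t : List String) (x : String)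
    (h : x ∈ p.1) : x ∈ (collectStep p t).1 := by
  rcases t with _ | ⟨a, _ | ⟨b, _ | ⟨c, _ | ⟨d, t⟩⟩⟩⟩ <;>
    simp only [collectStep] <;> try exact h
  exact mem_snocIf_of_mem _ _ _ (mem_snocIf_of_mem _ _ _ h)

theorem collect_mono2 (p : List String × List String) (t : List String) (x : String)
    (h : x ∈ p.2) : x ∈ (collectStep p t).2 := by
  rcases t with _ | ⟨a, _ | ⟨b, _ | ⟨c, _ | ⟨d, t⟩⟩⟩⟩ <;>
    simp only [collectStep] <;> try exact h
  exact mem_snocIf_of_mem _ _ _ h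

theorem collect_nodup (p : List String × List String) (t : List String)
    (h1 : p.1.Nodup) (h2 : p.2.Nodup) : (collectStep p t).1.Nodup ∧ (collectStep p t).2.Nodup := by
  rcases t with _ | ⟨a, _ | ⟨b, _ | ⟨c, _ | ⟨d, t⟩⟩⟩⟩ <;>
    simp only [collectStep] <;> try exact ⟨h1, h2⟩
  exact ⟨nodup_snocIf _ _ (nodup_snocIf _ _ h1), nodup_snocIf _ _ h2⟩

theorem foldl_collect_nodup (l : List (List String)) (p : List String × List String)
    (h1 : p.1.Nodup) (h2 : p.2.Nodup) :
    (l.foldl collectStep p).1.Nodup ∧ (l.foldl collectStep p).2.Nodup := by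
  induction l generalizing p with
  | nil => exact ⟨h1, h2⟩
  | cons t l ih =>
    obtain ⟨n1, n2⟩ := collect_nodup p t h1 h2
    exact ih _ n1 n2

theorem er_nodup (g : List (List String)) : (pvER g).1.Nodup ∧ (pvER g).2.Nodup :=
  foldl_collect_nodup _ _ (by simp) (by simp)

theorem foldl_collect_mono1 (l : List (List String)) (p : List String × List String)
    (x : String) (hx : x ∈ p.1) : x ∈ (l.foldl collectStep p).1 := by
  induction l generalizing p with
  | nil => exact hx
  | cons t l ih => exact ih _ (collect_mono1 p t x hx)

theorem foldl_collect_mono2 (l : List (List String)) (p : List String × List String)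
    (x : String) (hx : x ∈ p.2) : x ∈ (l.foldl collectStep p).2 := by
  induction l generalizing p with
  | nil => exact hx
  | cons t l ih => exact ih _ (collect_mono2 p t x hx)

theorem foldl_collect_mem (l : List (List String)) (p : List String × List String)
    (h r tl : String) (hm : [h, r, tl] ∈ l) :
    h ∈ (l.foldl collectStep p).1 ∧ tl ∈ (l.foldl collectStep p).1 ∧ r ∈ (l.foldl collectStep p).2 := by
  induction l generalizing p with
  | nil => cases hm
  | cons t l ih =>
    rcases List.mem_cons.mp hm with h1 | h1
    · subst h1
      simp only [List.foldl_cons]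
      rw [collectStep_triple]
      exact ⟨foldl_collect_mono1 _ _ _ (by
          rw [show (snocIf (snocIf p.1 h) tl, snocIf p.2 r).1 = snocIf (snocIf p.1 h) tl from rfl]
          exact mem_snocIf_of_mem _ _ _ (mem_snocIf_self _ _)),
        foldl_collect_mono1 _ _ _ (mem_snocIf_self _ _),
        foldl_collect_mono2 _ _ _ (mem_snocIf_self _ _)⟩
    · exact ih _ h1

theorem mem_er (g : List (List String)) (h r tl : String) (hm : [h, r, tl] ∈ pvValid g) :
    h ∈ (pvER g).1 ∧ tl ∈ (pvER g).1 ∧ r ∈ (pvER g).2 :=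
  foldl_collect_mem _ _ h r tl hm

theorem er_append3 (g : List (List String)) (t : List String) (h : PySem.List.len t = 3) :
    pvER (g ++ [t]) = collectStep (pvER g) t ∧ pvValid (g ++ [t]) = pvValid g ++ [t] := by
  have h' : ((t.length : Int)) = 3 := by simpa [PySem.List.len_eq] using h
  constructor
  · unfold pvER pvValid
    rw [List.filter_append, List.foldl_append]
    simp [List.filter, h']
  · unfold pvValid
    rw [List.filter_append]
    simp [List.filter, h']

theorem er_append_not3 (g : List (List String)) (t : List String) (h : ¬ PySem.List.len t = 3) :
    pvER (g ++ [t]) = pvER g ∧ pvValid (g ++ [t]) = pvValid g := by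
  have h' : ¬ ((t.length : Int)) = 3 := by simpa [PySem.List.len_eq] using h
  have hb : (((t.length : Int)) == 3) = false := by simp [h']
  constructor
  · unfold pvER pvValid
    rw [List.filter_append, List.foldl_append]
    simp [List.filter, hb]
  · unfold pvValid
    rw [List.filter_append]
    simp [List.filter, hb]

-- items and keys of the canonical dicts
theorem items_eidsC (ents : List String) :
    (eidsC ents).items = ents.zipIdx.map (fun p => (p.1, pyChr (65 + p.2))) := rfl
theorem items_emapC (ents : List String) :
    (emapC ents).items = ents.zipIdx.map (fun p => (pyChr (65 + p.2), p.1)) := rfl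
theorem items_ridsC (rels : List String) :
    (ridsC rels).items = rels.zipIdx.map (fun p => (p.1, index_to_alpha (p.2 : Int))) := rfl
theorem items_rmapC (rels : List String) :
    (rmapC rels).items = rels.zipIdx.map (fun p => (index_to_alpha (p.2 : Int), p.1)) := rfl

theorem keys_eidsC (ents : List String) : (eidsC ents).keys = ents := by
  show List.map _ (eidsC ents).items = ents
  rw [items_eidsC]
  apply List.ext_getElem
  · simp
  · intro i h1 h2
    simp [List.getElem_zipIdx]

theorem keys_ridsC (rels : List String) : (ridsC rels).keys = rels := by
  show List.map _ (ridsC rels).items = rels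
  rw [items_ridsC]
  apply List.ext_getElem
  · simp
  · intro i h1 h2
    simp [List.getElem_zipIdx]

theorem keys_emapC (ents : List String) :
    (emapC ents).keys = ents.zipIdx.map (fun p => pyChr (65 + p.2)) := by
  show List.map _ (emapC ents).items = _
  rw [items_emapC]
  apply List.ext_getElem
  · simp
  · intro i h1 h2
    simp [List.getElem_zipIdx]

theorem keys_rmapC (rels : List String) :
    (rmapC rels).keys = rels.zipIdx.map (fun p => index_to_alpha (p.2 : Int)) := by
  show List.map _ (rmapC rels).items = _
  rw [items_rmapC]
  apply List.ext_getElem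
  · simp
  · intro i h1 h2
    simp [List.getElem_zipIdx]

theorem contains_eidsC (ents : List String) (e : String) :
    (eidsC ents).contains e = decide (e ∈ ents) := by
  rw [PySem.Dict.contains_eq_decide_mem_keys, keys_eidsC]

theorem contains_ridsC (rels : List String) (r : String) :
    (ridsC rels).contains r = decide (r ∈ rels) := by
  rw [PySem.Dict.contains_eq_decide_mem_keys, keys_ridsC]

theorem get_eidsC (ents : List String) (e : String) (hn : ents.Nodup) (he : e ∈ ents) :
    ((eidsC ents).get? e).getD "" = ekeyB ents e := by
  have hlt : ents.idxOf e < ents.length := List.idxOf_lt_length_of_mem he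
  have hz : (ents.zipIdx)[ents.idxOf e]'(by simpa using hlt) = (e, ents.idxOf e) := by
    rw [List.getElem_zipIdx]
    simp [List.getElem_idxOf]
  have hmem : (e, pyChr (65 + ents.idxOf e)) ∈ (eidsC ents).items := by
    rw [items_eidsC]
    have : (e, ents.idxOf e) ∈ ents.zipIdx := hz ▸ List.getElem_mem _
    exact List.mem_map_of_mem this
  have hkn : (eidsC ents).keys.Nodup := by rw [keys_eidsC]; exact hn
  rw [PySem.Dict.get?_of_mem_items _ hmem hkn]
  unfold ekeyB
  rw [index?_eq_idxOf _ _ he]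
  rfl

theorem get_ridsC (rels : List String) (r : String) (hn : rels.Nodup) (hr : r ∈ rels) :
    ((ridsC rels).get? r).getD "" = rkeyB rels r := by
  have hlt : rels.idxOf r < rels.length := List.idxOf_lt_length_of_mem hr
  have hz : (rels.zipIdx)[rels.idxOf r]'(by simpa using hlt) = (r, rels.idxOf r) := by
    rw [List.getElem_zipIdx]
    simp [List.getElem_idxOf]
  have hmem : (r, index_to_alpha (rels.idxOf r : Int)) ∈ (ridsC rels).items := by
    rw [items_ridsC]
    have : (r, rels.idxOf r) ∈ rels.zipIdx := hz ▸ List.getElem_mem _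
    exact List.mem_map_of_mem this
  have hkn : (ridsC rels).keys.Nodup := by rw [keys_ridsC]; exact hn
  rw [PySem.Dict.get?_of_mem_items _ hmem hkn]
  unfold rkeyB
  rw [index?_eq_idxOf _ _ hr]
  rfl

-- fresh insertions append at the end of the table
theorem eidsC_snoc (ents : List String) (e : String) (he : e ∉ ents) :
    (eidsC ents).insert e (pyChr (65 + ents.length)) = eidsC (ents ++ [e]) := by
  apply PySem.Dict.ext
  rw [PySem.Dict.items_insert_of_not_contains _ _ (by rw [contains_eidsC]; simpa using he)]
  rw [items_eidsC, items_eidsC, List.zipIdx_append]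
  simp

theorem ridsC_snoc (rels : List String) (r : String) (hr : r ∉ rels) :
    (ridsC rels).insert r (index_to_alpha (rels.length : Int)) = ridsC (rels ++ [r]) := by
  apply PySem.Dict.ext
  rw [PySem.Dict.items_insert_of_not_contains _ _ (by rw [contains_ridsC]; simpa using hr)]
  rw [items_ridsC, items_ridsC, List.zipIdx_append]
  simp

theorem emapC_snoc (ents : List String) (e : String) (he : e ∉ ents) :
    (emapC ents).insert (pyChr (65 + ents.length)) e = emapC (ents ++ [e]) := by
  apply PySem.Dict.ext
  have hfresh : (emapC ents).contains (pyChr (65 + ents.length)) = false := by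
    rw [PySem.Dict.contains_eq_decide_mem_keys, keys_emapC]
    simp only [decide_eq_false_iff_not, List.mem_map]
    rintro ⟨p, hp, hkey⟩
    have h2 := List.snd_lt_of_mem_zipIdx hp
    have := pyChr_inj hkey
    omega
  rw [PySem.Dict.items_insert_of_not_contains _ _ hfresh]
  rw [items_emapC, items_emapC, List.zipIdx_append]
  simp

theorem rmapC_snoc (rels : List String) (r : String) (hr : r ∉ rels) :
    (rmapC rels).insert (index_to_alpha (rels.length : Int)) r = rmapC (rels ++ [r]) := by
  apply PySem.Dict.ext
  have hfresh : (rmapC rels).contains (index_to_alpha (rels.length : Int)) = false := by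
    rw [PySem.Dict.contains_eq_decide_mem_keys, keys_rmapC]
    simp only [decide_eq_false_iff_not, List.mem_map]
    rintro ⟨p, hp, hkey⟩
    have h2 := List.snd_lt_of_mem_zipIdx hp
    have := ita_inj _ _ hkey
    omega
  rw [PySem.Dict.items_insert_of_not_contains _ _ hfresh]
  rw [items_rmapC, items_rmapC, List.zipIdx_append]
  simp

-- keys are stable when a table only grows at the end
theorem ekeyB_stable (ents ext : List String) (e : String) (he : e ∈ ents) :
    ekeyB (ents ++ ext) e = ekeyB ents e := by
  unfold ekeyB
  rw [PySem.List.index?_append_of_mem ext he]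

theorem rkeyB_stable (rels ext : List String) (r : String) (hr : r ∈ rels) :
    rkeyB (rels ++ ext) r = rkeyB rels r := by
  unfold rkeyB
  rw [PySem.List.index?_append_of_mem ext hr]

theorem render_stable (ents rels exte extr : List String) (t : List String)
    (hm : ∀ h r tl, t = [h, r, tl] → h ∈ ents ∧ tl ∈ ents ∧ r ∈ rels) :
    renderTriple (ents ++ exte) (rels ++ extr) t = renderTriple ents rels t := by
  rcases t with _ | ⟨a, _ | ⟨b, _ | ⟨c, _ | ⟨d, t⟩⟩⟩⟩ <;> simp only [renderTriple]
  obtain ⟨h1, h2, h3⟩ := hm a b c rfl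
  rw [ekeyB_stable _ _ _ h1, ekeyB_stable _ _ _ h2, rkeyB_stable _ _ _ h3]

-- one entity step on a canonical state
theorem stepAEnt_canon (ents rels trs : List String) (e : String) :
    stepAEnt (canonS ents rels trs) e = canonS (snocIf ents e) rels trs := by
  unfold stepAEnt
  simp only [canonS_entity_ids, canonS_entity_map, canonS_entity_counter, canonS_rel_ids,
    canonS_rel_map, canonS_rel_counter, canonS_triples, contains_eidsC]
  by_cases he : e ∈ ents
  · simp [he, snocIf]
  · simp only [he, decide_false, Bool.false_eq_true, if_false]
    unfold snocIf
    rw [if_neg he, eidsC_snoc ents e he, emapC_snoc ents e he]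
    unfold canonS
    simp

-- one relation step on a canonical state
theorem relStep_canon (ents rels trs : List String) (r : String) :
    (if (ridsC rels).contains r then canonS ents rels trs
     else AState.mk (emapC ents) ((rmapC rels).insert (index_to_alpha (rels.length : Int)) r)
            (eidsC ents) ((ridsC rels).insert r (index_to_alpha (rels.length : Int)))
            ents.length (rels.length + 1) trs)
    = canonS ents (snocIf rels r) trs := by
  rw [contains_ridsC]
  by_cases hr : r ∈ rels
  · simp [hr, snocIf]
  · simp only [hr, decide_false, Bool.false_eq_true, if_false]
    unfold snocIf
    rw [if_neg hr, ridsC_snoc rels r hr, rmapC_snoc rels r hr]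
    unfold canonS
    simp

-- the explicit unfolding of A's loop body on a triple
theorem stepA_triple (s : AState) (h r tl : String) :
    stepA s [h, r, tl] =
      (let s1 := stepAEnt (stepAEnt s h) tl
       let s2 :=
         if s1.rel_ids.contains r then s1
         else { s1 with rel_ids := s1.rel_ids.insert r (index_to_alpha (s1.rel_counter : Int)),
                        rel_map := s1.rel_map.insert (index_to_alpha (s1.rel_counter : Int)) r,
                        rel_counter := s1.rel_counter + 1 }
       { s2 with triples := s2.triples ++
           [((s2.entity_ids.get? h).getD "" ++ ", " ++ (s2.rel_ids.get? r).getD ""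
               ++ ", " ++ (s2.entity_ids.get? tl).getD "")] }) := rfl

-- the main step: processing one more element keeps the state canonical
set_option maxHeartbeats 1600000 in
theorem stepA_canon (g : List (List String)) (t : List String) :
    stepA (canon g) t = canon (g ++ [t]) := by
  by_cases h3 : PySem.List.len t = 3
  · have hlen : t.length = 3 := by
      have h' : ((t.length : Int)) = 3 := by simpa [PySem.List.len_eq] using h3
      exact_mod_cast h'
    obtain ⟨h, r, tl, rfl⟩ : ∃ h r tl, t = [h, r, tl] := by
      rcases t with _ | ⟨a, _ | ⟨b, _ | ⟨c, _ | ⟨d, t⟩⟩⟩⟩ <;> simp at hlen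
      exact ⟨a, b, c, rfl⟩
    obtain ⟨hER, hV⟩ := er_append3 g [h, r, tl] h3
    obtain ⟨hnE, hnR⟩ := er_nodup g
    have hcanon : canon g = canonS (pvER g).1 (pvER g).2
        ((pvValid g).map (renderTriple (pvER g).1 (pvER g).2)) := rfl
    have hcanon2 : canon (g ++ [[h, r, tl]]) =
        canonS (snocIf (snocIf (pvER g).1 h) tl) (snocIf (pvER g).2 r)
          ((pvValid g ++ [[h, r, tl]]).map
            (renderTriple (snocIf (snocIf (pvER g).1 h) tl) (snocIf (pvER g).2 r))) := by
      unfold canon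
      rw [hER, hV, collectStep_triple]
    rw [hcanon, hcanon2, stepA_triple]
    simp only [stepAEnt_canon, canonS_rel_ids, canonS_rel_map, canonS_rel_counter,
      canonS_entity_ids, canonS_entity_map, canonS_entity_counter, canonS_triples]
    rw [relStep_canon]
    simp only [canonS_rel_ids, canonS_rel_map, canonS_rel_counter, canonS_entity_ids,
      canonS_entity_map, canonS_entity_counter, canonS_triples]
    set E := (pvER g).1 with hE
    set R := (pvER g).2 with hR
    set E2 := snocIf (snocIf E h) tl with hE2
    set R1 := snocIf R r with hR1
    have hnE2 : E2.Nodup := nodup_snocIf _ _ (nodup_snocIf _ _ hnE)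
    have hnR1 : R1.Nodup := nodup_snocIf _ _ hnR
    have hhm : h ∈ E2 := mem_snocIf_of_mem _ _ _ (mem_snocIf_self _ _)
    have htm : tl ∈ E2 := mem_snocIf_self _ _
    have hrm : r ∈ R1 := mem_snocIf_self _ _
    unfold canonS
    simp only [AState.mk.injEq, true_and]
    rw [List.map_append]
    congr 1
    · -- old triples keep their rendering
      obtain ⟨exte1, he1⟩ := snocIf_eq_append E h
      obtain ⟨exte2, he2⟩ := snocIf_eq_append (snocIf E h) tl
      obtain ⟨extr1, hr1⟩ := snocIf_eq_append R r
      have hEapp : E2 = E ++ (exte1 ++ exte2) := by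
        rw [hE2, he2, he1, List.append_assoc]
      symm
      apply List.map_congr_left
      intro t' ht'
      rw [hEapp, hR1, hr1]
      apply render_stable
      intro h' r' tl' hshape
      subst hshape
      exact mem_er g h' r' tl' ht'
    · -- the new line
      simp only [List.map_cons, List.map_nil, renderTriple]
      rw [get_eidsC _ _ hnE2 hhm, get_ridsC _ _ hnR1 hrm, get_eidsC _ _ hnE2 htm]
  · have h1 := (er_append_not3 g t h3).1
    have h2 := (er_append_not3 g t h3).2
    have hs : stepA (canon g) t = canon g := by
      unfold stepA
      rw [if_pos h3]
    rw [hs]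
    unfold canon
    rw [h1, h2]

theorem foldl_stepA_canon (g p : List (List String)) :
    g.foldl stepA (canon p) = canon (p ++ g) := by
  induction g generalizing p with
  | nil => simp
  | cons t g ih =>
    simp only [List.foldl_cons, stepA_canon]
    rw [ih]
    simp

-- a Nodup table rendered by position equals the same table rendered through `.index`
theorem zipIdx_map_eq_map_index {β : Type} (l : List String) (hn : l.Nodup)
    (F : String → Nat → β) :
    l.zipIdx.map (fun p => F p.1 p.2) = l.map (fun e => F e ((PySem.List.index? l e).getD 0)) := by
  apply List.ext_getElem
  · simp
  · intro i h1 h2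
    have h3 : i < l.length := by simpa using h2
    simp only [List.getElem_map]
    rw [List.getElem_zipIdx (by simpa using h3)]
    have hm : l[i] ∈ l := List.getElem_mem _
    rw [index?_eq_idxOf _ _ hm]
    rw [List.Nodup.idxOf_getElem hn i h3]
    simp

theorem emap_lines (ents : List String) (hn : ents.Nodup) :
    (emapC ents).items.map (fun kv => kv.1 ++ ": " ++ kv.2)
      = ents.map (fun e => ekeyB ents e ++ ": " ++ e) := by
  rw [items_emapC, List.map_map]
  exact zipIdx_map_eq_map_index ents hn (fun e i => pyChr (65 + i) ++ ": " ++ e)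

theorem rmap_lines (rels : List String) (hn : rels.Nodup) :
    (rmapC rels).items.map (fun kv => kv.1 ++ ": " ++ kv.2)
      = rels.map (fun r => rkeyB rels r ++ ": " ++ r) := by
  rw [items_rmapC, List.map_map]
  exact zipIdx_map_eq_map_index rels hn (fun r i => index_to_alpha (i : Int) ++ ": " ++ r)

-- A reduces to the canonical rendering
theorem A_eq_canonLines (graph : List (List String)) :
    lookup_table_graph graph = PySem.Str.join "\n" (canonLines graph) := by
  unfold lookup_table_graph canonLines
  have h0 : (⟨.empty, .empty, .empty, .empty, 0, 0, []⟩ : AState) = canon [] := rfl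
  rw [h0, show graph.foldl stepA (canon []) = canon graph from by
    simpa using foldl_stepA_canon graph []]
  obtain ⟨hne, hnr⟩ := er_nodup graph
  have hcanon : canon graph = canonS (pvER graph).1 (pvER graph).2
      ((pvValid graph).map (renderTriple (pvER graph).1 (pvER graph).2)) := rfl
  rw [hcanon]
  simp only [canonS_entity_map, canonS_rel_map, canonS_triples]
  rw [emap_lines _ hne, rmap_lines _ hnr]

-- ===== B-side lemmas =====

theorem mem_valid_shape (g : List (List String)) (t : List String) (ht : t ∈ pvValid g) :
    ∃ h r tl, t = [h, r, tl] := by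
  unfold pvValid at ht
  have h0 := List.of_mem_filter ht
  have h' : ((t.length : Int)) = 3 := by simpa [PySem.List.len_eq] using h0
  have hlen : t.length = 3 := by exact_mod_cast h'
  rcases t with _ | ⟨a, _ | ⟨b, _ | ⟨c, _ | ⟨d, t⟩⟩⟩⟩ <;> simp at hlen
  exact ⟨a, b, c, rfl⟩

-- A's table fold = the snocIf fold over B's occurrence streams
theorem foldl_collect_eq_flat (l : List (List String))
    (hs : ∀ t ∈ l, ∃ h r tl, t = [h, r, tl]) (p : List String × List String) :
    l.foldl collectStep p = ((flatEnts l).foldl snocIf p.1, (flatRels l).foldl snocIf p.2) := by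
  induction l generalizing p with
  | nil => simp [flatEnts, flatRels]
  | cons t l ih =>
    obtain ⟨h, r, tl, rfl⟩ := hs t (List.mem_cons_self ..)
    have hs' : ∀ t ∈ l, ∃ h r tl, t = [h, r, tl] := fun t ht => hs t (List.mem_cons_of_mem _ ht)
    simp only [List.foldl_cons, collectStep_triple]
    rw [ih hs']
    simp [flatEnts, flatRels]

theorem er_eq_dedupF (g : List (List String)) :
    pvER g = (dedupF (flatEnts (pvValid g)), dedupF (flatRels (pvValid g))) := by
  unfold pvER dedupF
  exact foldl_collect_eq_flat (pvValid g) (mem_valid_shape g) ([], [])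

-- membership in a snocIf fold
theorem mem_foldl_snocIf (s : List String) (a : List String) (x : String) :
    x ∈ s.foldl snocIf a ↔ x ∈ a ∨ x ∈ s := by
  induction s generalizing a with
  | nil => simp
  | cons y s ih =>
    rw [List.foldl_cons, ih]
    have hy : x ∈ snocIf a y ↔ x ∈ a ∨ x = y := by
      unfold snocIf; split_ifs with h
      · constructor
        · exact Or.inl
        · rintro (hx | rfl) <;> [exact hx; exact h]
      · simp
    rw [hy]
    simp only [List.mem_cons]
    tauto

theorem mem_dedupF (s : List String) (x : String) : x ∈ dedupF s ↔ x ∈ s := by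
  unfold dedupF
  rw [mem_foldl_snocIf]
  simp

theorem nodup_dedupF (s : List String) : (dedupF s).Nodup := by
  have gen : ∀ (s a : List String), a.Nodup → (s.foldl snocIf a).Nodup := by
    intro s
    induction s with
    | nil => exact fun a h => h
    | cons y s ih => exact fun a h => ih _ (nodup_snocIf a y h)
  exact gen s [] (by simp)

-- first-appearance dedup is strictly increasing in first-occurrence index
theorem dedupF_pairwise (s : List String) :
    (dedupF s).Pairwise (fun x y => s.idxOf x < s.idxOf y) := by
  induction s using List.reverseRecOn with
  | nil => simp [dedupF]
  | append_singleton s x ih =>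
    have hstep : dedupF (s ++ [x]) = snocIf (dedupF s) x := by
      unfold dedupF
      rw [List.foldl_append]
      rfl
    rw [hstep]
    have ih' : (dedupF s).Pairwise (fun a b => (s ++ [x]).idxOf a < (s ++ [x]).idxOf b) := by
      refine ih.imp_of_mem ?_
      intro a b ha hb hlt
      rw [List.idxOf_append_of_mem ((mem_dedupF s a).mp ha),
        List.idxOf_append_of_mem ((mem_dedupF s b).mp hb)]
      exact hlt
    unfold snocIf
    split_ifs with hx
    · exact ih'
    · have hx' : x ∉ s := fun h => hx ((mem_dedupF s x).mpr h)
      rw [List.pairwise_append]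
      refine ⟨ih', List.pairwise_singleton _ _, ?_⟩
      intro a ha b hb
      rw [List.mem_singleton] at hb
      subst hb
      rw [List.idxOf_append_of_mem ((mem_dedupF s a).mp ha),
        List.idxOf_append_of_notMem hx']
      simp
      exact List.idxOf_lt_length_of_mem ((mem_dedupF s a).mp ha)

-- the reversed-enumerate overwrite loop computes first-occurrence indices
theorem firstIndex_get?_gen (s : List String) (k : Int) (d : PySem.Dict String Int) (e : String) :
    ((PySem.List.enumerate s k).reverse.foldl (fun d p => d.insert p.2 p.1) d).get? e
      = if e ∈ s then some (k + (s.idxOf e : Int)) else d.get? e := by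
  induction s generalizing k d with
  | nil => simp [PySem.List.enumerate_nil]
  | cons x xs ih =>
    rw [PySem.List.enumerate_cons, List.reverse_cons, List.foldl_append]
    simp only [List.foldl_cons, List.foldl_nil]
    rw [PySem.Dict.get?_insert]
    by_cases hex : e = x
    · subst hex
      simp
    · rw [if_neg hex, ih (k + 1) d]
      have hxe : x ≠ e := fun h => hex h.symm
      by_cases hm : e ∈ xs
      · rw [if_pos hm, if_pos (List.mem_cons_of_mem _ hm), List.idxOf_cons_ne _ hxe]
        push_cast
        ring_nf
      · rw [if_neg hm, if_neg (by simp [hex, hm])]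

theorem firstIndex_get? (s : List String) (e : String) :
    (firstIndex s).get? e = if e ∈ s then some ((s.idxOf e : Nat) : Int) else none := by
  unfold firstIndex
  rw [firstIndex_get?_gen]
  simp

theorem mem_keys_firstIndex (s : List String) (e : String) :
    e ∈ (firstIndex s).keys ↔ e ∈ s := by
  have h := firstIndex_get? s e
  by_cases he : e ∈ s
  · rw [if_pos he] at h
    simp only [he, iff_true]
    by_contra hk
    rw [← PySem.Dict.get?_eq_none_iff_not_mem_keys] at hk
    rw [hk] at h
    cases h
  · rw [if_neg he] at h
    simp only [he, iff_false]
    exact (PySem.Dict.get?_eq_none_iff_not_mem_keys _ _).mp h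

theorem nodup_keys_firstIndex (s : List String) : (firstIndex s).keys.Nodup := by
  unfold firstIndex
  exact PySem.Dict.nodup_keys_foldl_insert_key _ (fun (p : Int × String) => p.2)
    (fun d (p : Int × String) => p.1) _ (by simp)

-- sorting the distinct items by first index recovers the first-appearance order
theorem sorted_firstIndex (s : List String) :
    PySem.List.sorted (firstIndex s).keys (fun e => ((firstIndex s).get? e).getD 0) false
      = dedupF s := by
  have hperm : (dedupF s).Perm (firstIndex s).keys := by
    refine (List.perm_ext_iff_of_nodup (nodup_dedupF s) (nodup_keys_firstIndex s)).mpr ?_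
    intro a
    rw [mem_dedupF, mem_keys_firstIndex]
  have hpw : (dedupF s).Pairwise
      (fun a b => ((firstIndex s).get? a).getD 0 < ((firstIndex s).get? b).getD 0) := by
    refine (dedupF_pairwise s).imp_of_mem ?_
    intro a b ha hb hlt
    rw [firstIndex_get?, if_pos ((mem_dedupF s a).mp ha),
      firstIndex_get?, if_pos ((mem_dedupF s b).mp hb)]
    simpa using hlt
  exact PySem.List.sorted_eq_of_perm_of_pairwise_lt _ _ _ hperm hpw

-- enumerate as zipIdx
theorem enumerate_eq_zipIdx (xs : List String) :
    PySem.List.enumerate xs = xs.zipIdx.map (fun p => ((p.2 : Int), p.1)) := by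
  have gen : ∀ (xs : List String) (n : Nat),
      PySem.List.enumerate xs (n : Int) = (xs.zipIdx n).map (fun p => ((p.2 : Int), p.1)) := by
    intro xs
    induction xs with
    | nil => simp [PySem.List.enumerate_nil]
    | cons x xs ih =>
      intro n
      rw [PySem.List.enumerate_cons, List.zipIdx_cons, List.map_cons]
      have : ((n : Int) + 1) = ((n + 1 : Nat) : Int) := by push_cast; ring
      rw [this, ih (n + 1)]
  simpa using gen xs 0

-- the comprehension dicts are the canonical tables
theorem mkKeyDict_items (xs : List String) (hn : xs.Nodup) (F : Int → String) :
    (mkKeyDict xs F).items = xs.zipIdx.map (fun p => (p.1, F (p.2 : Int))) := by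
  unfold mkKeyDict
  have hfresh : ∀ p ∈ PySem.List.enumerate xs, (PySem.Dict.empty : PySem.Dict String String).contains p.2 = false := by
    intro p _
    simp
  have hnk : ((PySem.List.enumerate xs).map (fun (p : Int × String) => p.2)).Nodup := by
    rw [PySem.List.map_snd_enumerate]
    exact hn
  rw [PySem.Dict.items_foldl_insert_fresh (PySem.List.enumerate xs)
    (fun (p : Int × String) => p.2) (fun (p : Int × String) => F p.1) PySem.Dict.empty hfresh hnk]
  rw [enumerate_eq_zipIdx, List.map_map]
  rfl

theorem mkKeyDict_eids (xs : List String) (hn : xs.Nodup) :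
    mkKeyDict xs (fun i => pyChr (65 + i.toNat)) = eidsC xs := by
  apply PySem.Dict.ext
  rw [mkKeyDict_items xs hn, items_eidsC]
  apply List.map_congr_left
  intro p _
  simp

theorem mkKeyDict_rids (xs : List String) (hn : xs.Nodup) :
    mkKeyDict xs (fun i => index_to_alpha i) = ridsC xs := by
  apply PySem.Dict.ext
  rw [mkKeyDict_items xs hn, items_ridsC]

-- B reduces to the canonical rendering
theorem B_eq_canonLines (graph : List (List String)) :
    lookup_table_graph_alt graph = PySem.Str.join "\n" (canonLines graph) := by
  obtain ⟨hnE, hnR⟩ := er_nodup graph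
  have hER := er_eq_dedupF graph
  have hE1 : dedupF (flatEnts (pvValid graph)) = (pvER graph).1 := by rw [hER]
  have hR1 : dedupF (flatRels (pvValid graph)) = (pvER graph).2 := by rw [hER]
  unfold lookup_table_graph_alt canonLines
  dsimp only []
  rw [show graph.filter (fun t => PySem.List.len t == 3) = pvValid graph from rfl]
  rw [sorted_firstIndex, sorted_firstIndex, hE1, hR1]
  rw [mkKeyDict_eids _ hnE, mkKeyDict_rids _ hnR]
  refine congrArg (PySem.Str.join "\n") ?_
  congr 1
  · congr 1
    · congr 1
      · congr 1
        · congr 1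
          apply List.map_congr_left
          intro e he
          rw [get_eidsC _ _ hnE he]
      · apply List.map_congr_left
        intro r hr
        rw [get_ridsC _ _ hnR hr]
  · apply List.map_congr_left
    intro t ht
    obtain ⟨h, r, tl, rfl⟩ := mem_valid_shape graph t ht
    obtain ⟨hh, htl, hr⟩ := mem_er graph h r tl ht
    simp only [renderTriple]
    rw [get_eidsC _ _ hnE hh, get_ridsC _ _ hnR hr, get_eidsC _ _ hnE htl]

-- ===== VERDICT (by name: the statement is the Claim_ definition above) =====
theorem lookup_table_graph_spec : Claim_equal_lookup_table_graph := by
  intro graph _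
  unfold Spec_lookup_table_graph
  rw [A_eq_canonLines, B_eq_canonLines]
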